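-- pv_equiv track=rewrite | github.com/letgodchan0/Al_Is_Well | 3주차/0617/찬영/방금 그곡.py | solution
-- ===== SOURCE A (Python) =====
-- def change_code(m):
--     return m.replace('C#','c').replace('D#','d').replace('F#','f').replace('G#','g').replace('A#','a')
--
-- def timecheck(time1, time2):
--     time1 = int(time1[:2]) * 60 + int(time1[3:])
--     time2 = int(time2[:2]) * 60 + int(time2[3:])
--     return time2 - time1
--
-- def solution(m, musicinfos):
--     m = change_code(m)
--     check = []
--     code = ['C', 'c', 'D', 'd', 'E', 'F', 'f', 'G', 'g', 'A', 'a', 'B']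
--     for info in musicinfos:
--         information = info.split(',')
--         time = timecheck(information[0], information[1])
--         song = information[2]
--         play = change_code(information[3])
--         if len(play) > time:
--             play = play[:time]
--         else:
--             play = play * (time // len(play)) + play[:(time % len(play))]
--
--         if m in play:
--             check.append((song, time))
--
--     if len(check) == 0:
--         return "(None)"
--
--     return sorted(check, key = lambda x: x[1], reverse = True)[0][0]
-- ===== SOURCE B (Python) =====
-- def change_code(m):
--     return m.replace('C#','c').replace('D#','d').replace('F#','f').replace('G#','g').replace('A#','a')
--
-- def timecheck(time1, time2):
--     time1 = int(time1[:2]) * 60 + int(time1[3:])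
--     time2 = int(time2[:2]) * 60 + int(time2[3:])
--     return time2 - time1
--
-- def _hit(m, info):
--     information = info.split(',')
--     time = timecheck(information[0], information[1])
--     song = information[2]
--     play = change_code(information[3])
--     if len(play) > time:
--         play = play[:time]
--     else:
--         play = play * (time // len(play)) + play[:(time % len(play))]
--     return (song, time) if m in play else None
--
-- def solution(m, musicinfos):
--     m = change_code(m)
--     best = None
--     for info in musicinfos:
--         hit = _hit(m, info)
--         if hit is not None and (best is None or best[1] < hit[1]):
--             best = hit
--     return best[0] if best is not None else "(None)"
-- ===== Notes on version B (the rewrite author's own statement) =====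
-- stated objective: simpler
-- what changed: The per-record parse/tile/match logic is kept, but A's tail (append every hit to a list, stable-sort it by time descending, take the head) is replaced by a single running strict-max accumulator (best hit so far as an Optional), so no auxiliary list and no sort.
import Mathlib
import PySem

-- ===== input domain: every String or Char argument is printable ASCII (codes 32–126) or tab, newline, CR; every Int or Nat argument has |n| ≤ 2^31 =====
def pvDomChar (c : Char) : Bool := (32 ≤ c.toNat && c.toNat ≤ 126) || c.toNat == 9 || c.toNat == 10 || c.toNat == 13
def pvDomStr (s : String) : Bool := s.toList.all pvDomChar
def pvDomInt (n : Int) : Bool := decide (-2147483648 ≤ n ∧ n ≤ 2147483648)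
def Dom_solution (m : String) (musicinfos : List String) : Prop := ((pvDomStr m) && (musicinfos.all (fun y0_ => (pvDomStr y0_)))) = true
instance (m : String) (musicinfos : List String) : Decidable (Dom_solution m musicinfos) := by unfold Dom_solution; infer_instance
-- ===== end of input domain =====

-- B replaces A's build-a-list-then-stable-sort tail by a single running strict-max accumulator; same return value on Pre_.

-- ===== PORT A =====
-- shared module-level helpers of the Python file (used by both versions)
def changeCode (s : String) : String :=
  PySem.Str.replace (PySem.Str.replace (PySem.Str.replace (PySem.Str.replace (PySem.Str.replace s "C#" "c") "D#" "d") "F#" "f") "G#" "g") "A#" "a"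

def timecheckP (time1 time2 : String) : Int :=
  let t1 := (PySem.Int.ofStr? (PySem.Str.slice time1 none (some 2))).getD 0 * 60
            + (PySem.Int.ofStr? (PySem.Str.slice time1 (some 3) none)).getD 0
  let t2 := (PySem.Int.ofStr? (PySem.Str.slice time2 none (some 2))).getD 0 * 60
            + (PySem.Int.ofStr? (PySem.Str.slice time2 (some 3) none)).getD 0
  t2 - t1

-- body of A's for-loop (the .getD defaults are only reached where the Python raises, outside Pre_)
def checkStep (mm : List Char) (check : List (String × Int)) (info : String) : List (String × Int) :=
  let information := (PySem.Str.split? info ",").getD []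
  let time := timecheckP (information.getD 0 "") (information.getD 1 "")
  let song := information.getD 2 ""
  let play := (changeCode (information.getD 3 "")).toList
  let play := if ((play.length : Int) > time) then PySem.List.slice play none (some time)
    else PySem.List.pyRepeat play (PySem.Int.floordiv time (play.length : Int))
         ++ PySem.List.slice play none (some (PySem.Int.mod time (play.length : Int)))
  if PySem.Chars.isIn mm play then check ++ [(song, time)] else check

def solution (m : String) (musicinfos : List String) : String :=
  let mm := (changeCode m).toList
  let check := musicinfos.foldl (checkStep mm) []
  if check.length == 0 then "(None)"
  else ((PySem.List.sorted check (fun x => x.2) true).headD ("", 0)).1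

-- ===== PORT B =====
-- B's helper: the optional (song, time) hit of one record
def altHit (mm : List Char) (info : String) : Option (String × Int) :=
  let information := (PySem.Str.split? info ",").getD []
  let time := timecheckP (information.getD 0 "") (information.getD 1 "")
  let song := information.getD 2 ""
  let play := (changeCode (information.getD 3 "")).toList
  let tiled := if ((play.length : Int) > time) then PySem.List.slice play none (some time)
    else PySem.List.pyRepeat play (PySem.Int.floordiv time (play.length : Int))
         ++ PySem.List.slice play none (some (PySem.Int.mod time (play.length : Int)))
  if PySem.Chars.isIn mm tiled then some (song, time) else none

-- body of B's running-max loop ('if hit is not None and (best is None or best[1] < hit[1]): best = hit')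
def bestStep (mm : List Char) (best : Option (String × Int)) (info : String) : Option (String × Int) :=
  let hit := altHit mm info
  if hit.isSome && (best.isNone || decide ((best.getD ("", 0)).2 < (hit.getD ("", 0)).2)) then hit else best

def solution_alt (m : String) (musicinfos : List String) : String :=
  let mm := (changeCode m).toList
  match musicinfos.foldl (bestStep mm) none with
  | some b => b.1
  | none => "(None)"

-- ===== PRECONDITION & SPEC =====
-- Pre_ excludes exactly the inputs where the Python A raises: a record with fewer than 4
-- comma-separated fields (IndexError), a time field whose [:2] / [3:] pieces are not int()-parseable
-- (ValueError), or an empty melody field with a non-negative duration (ZeroDivisionError).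
def Pre_solution (m : String) (musicinfos : List String) : Prop :=
  ∀ info ∈ musicinfos,
    let information := (PySem.Str.split? info ",").getD []
    4 ≤ information.length ∧
    (PySem.Int.ofStr? (PySem.Str.slice (information.getD 0 "") none (some 2))).isSome ∧
    (PySem.Int.ofStr? (PySem.Str.slice (information.getD 0 "") (some 3) none)).isSome ∧
    (PySem.Int.ofStr? (PySem.Str.slice (information.getD 1 "") none (some 2))).isSome ∧
    (PySem.Int.ofStr? (PySem.Str.slice (information.getD 1 "") (some 3) none)).isSome ∧
    (information.getD 3 "" ≠ "" ∨ timecheckP (information.getD 0 "") (information.getD 1 "") < 0)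
instance (m : String) (musicinfos : List String) : Decidable (Pre_solution m musicinfos) := by
  unfold Pre_solution; infer_instance

def pvWitness_solution : String × List String := ("ABC", ["12:00,12:14,HELLO,CDEFGAB"])

def Spec_solution (m : String) (musicinfos : List String) (out : String) : Prop := out = solution_alt m musicinfos
instance (m : String) (musicinfos : List String) (out : String) : Decidable (Spec_solution m musicinfos out) := by unfold Spec_solution; infer_instance

-- ===== CLAIM (what is proved, stated in full; the proofs are below) =====
def Claim_equal_solution : Prop := ∀ (m : String) (musicinfos : List String), Dom_solution m musicinfos → Pre_solution m musicinfos → Spec_solution m musicinfos (solution m musicinfos)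

-- ===== LEMMAS AND PROOFS =====

-- the running strict-max step on (song, time) pairs
def maxStep (b x : String × Int) : String × Int := if b.2 < x.2 then x else b

-- B's step on a present accumulator, without the Option wrapper
def optStep (best : Option (String × Int)) (hit : String × Int) : Option (String × Int) :=
  match best with
  | none => some hit
  | some b => if b.2 < hit.2 then some hit else some b

theorem ite_append_toList {α : Type} (c : Bool) (check : List α) (p : α) :
    (if c then check ++ [p] else check) = check ++ (if c then some p else none).toList := by
  cases c <;> simp

-- A's loop body appends exactly the optional hit B computes
theorem checkStep_eq (mm : List Char) (check : List (String × Int)) (info : String) :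
    checkStep mm check info = check ++ (altHit mm info).toList := by
  unfold checkStep altHit
  dsimp only
  exact ite_append_toList _ check _

-- A's whole loop builds the list of hits
theorem check_eq (mm : List Char) (l : List String) :
    l.foldl (checkStep mm) [] = l.filterMap (altHit mm) := by
  rw [show l.foldl (checkStep mm) []
        = l.foldl (fun check info => check ++ (altHit mm info).toList) [] from
      PySem.List.foldl_congr_mem l _ _ [] (fun check info _ => checkStep_eq mm check info)]
  rw [PySem.List.foldl_append_eq_flatMap, ← List.filterMap_eq_flatMap_toList, List.nil_append]

-- one step of B's loop, phrased by the value of the optional hit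
theorem bestStep_char (mm : List Char) (b : Option (String × Int)) (x : String)
    (r : Option (String × Int)) (hr : altHit mm x = r) :
    bestStep mm b x = (match r with | some hit => optStep b hit | none => b) := by
  simp only [bestStep, hr]
  cases r with
  | none => cases b <;> simp
  | some hit =>
    cases b with
    | none => simp [optStep]
    | some bb =>
      simp only [optStep, Option.isSome_some, Option.isNone_some, Option.getD_some,
        Bool.true_and, Bool.false_or]
      split <;> simp_all

-- B's whole loop is the option running-max of the list of hits
theorem best_eq (mm : List Char) (l : List String) (b : Option (String × Int)) :
    l.foldl (bestStep mm) b = (l.filterMap (altHit mm)).foldl optStep b := by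
  induction l generalizing b with
  | nil => rfl
  | cons x xs ih =>
    simp only [List.foldl_cons, List.filterMap_cons]
    generalize hr : altHit mm x = r
    rw [bestStep_char mm b x r hr]
    cases r with
    | none => exact ih b
    | some hit =>
      simp only [List.foldl_cons]
      exact ih _

-- B's option fold, once seeded, is the pure running-max fold
theorem optFold_some (l : List (String × Int)) (h : String × Int) :
    l.foldl optStep (some h) = some (l.foldl maxStep h) := by
  induction l generalizing h with
  | nil => rfl
  | cons x t ih =>
    simp only [List.foldl_cons]
    rw [show optStep (some h) x = some (maxStep h x) by
      by_cases hc : h.2 < x.2 <;> simp [optStep, maxStep, hc]]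
    exact ih (maxStep h x)

-- head of the reverse insertion sort accumulator is the running strict max
theorem insertFold_head (l : List (String × Int)) (h : String × Int) (t : List (String × Int)) (d : String × Int) :
    (l.foldl (fun acc x => PySem.List.insertBy (fun a b => decide (b.2 < a.2)) x acc) (h :: t)).headD d
      = l.foldl maxStep h := by
  induction l generalizing h t with
  | nil => rfl
  | cons x r ih =>
    simp only [List.foldl_cons]
    rw [show PySem.List.insertBy (fun a b => decide (b.2 < a.2)) x (h :: t)
        = if h.2 < x.2 then x :: h :: t
          else h :: PySem.List.insertBy (fun a b => decide (b.2 < a.2)) x t by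
      simp [PySem.List.insertBy]]
    by_cases hx : h.2 < x.2
    · simp only [if_pos hx]
      rw [ih]
      unfold maxStep; rw [if_pos hx]
    · simp only [if_neg hx]
      rw [ih]
      unfold maxStep; rw [if_neg hx]

-- head of sorted(l, key=time, reverse=True) is the first strict running max of l
theorem sorted_head_eq (p : String × Int) (rest : List (String × Int)) (d : String × Int) :
    (PySem.List.sorted (p :: rest) (fun x => x.2) true).headD d = rest.foldl maxStep p := by
  rw [PySem.List.sorted_rev_eq_foldl_insertBy]
  simp only [List.foldl_cons]
  exact insertFold_head rest p [] d

-- ===== VERDICT (by name: the statement is the Claim_ definition above) =====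
theorem solution_spec : Claim_equal_solution := by
  intro m musicinfos _ _
  unfold Spec_solution solution solution_alt
  dsimp only
  rw [check_eq, best_eq]
  generalize hfm2 : musicinfos.filterMap (altHit (changeCode m).toList) = hits
  cases hits with
  | nil => rfl
  | cons p rest =>
    simp only [List.foldl_cons]
    rw [show optStep none p = some p from rfl, optFold_some rest p, sorted_head_eq p rest ("", 0)]
    simp
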